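-- pv_equiv track=rewrite | github.com/zhangzaibin/spagent | spagent/examples/straight_evaluation_gpt.py | extract_question_and_answer
-- ===== SOURCE A (Python) =====
-- from typing import List, Dict, Any, Tuple
--
-- def extract_question_and_answer(conversation: List[Dict[str, str]]) -> Tuple[str, str]:
--     """从对话中提取问题和答案
--
--     Args:
--         conversation: 对话列表
--
--     Returns:
--         (问题, 答案) 元组
--     """
--     # 找到人类的问题
--     human_message = None
--     for msg in conversation:
--         if msg["from"] == "human":
--             human_message = msg["value"]
--             break
--
--     # 找到GPT的答案
--     gpt_answer = None
--     for msg in conversation: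
--         if msg["from"] == "gpt":
--             gpt_answer = msg["value"]
--             break
--
--     return human_message, gpt_answer
-- ===== SOURCE B (Python) =====
-- def extract_question_and_answer(conversation):
--     """从对话中提取问题和答案 — single pass with two accumulators and an early exit."""
--     human_message = None
--     gpt_answer = None
--     for msg in conversation:
--         role = msg["from"]
--         if human_message is None and role == "human":
--             human_message = msg["value"]
--         if gpt_answer is None and role == "gpt":
--             gpt_answer = msg["value"]
--         if human_message is not None and gpt_answer is not None:
--             break
--     return human_message, gpt_answer
-- ===== Notes on version B (the rewrite author's own statement) =====
-- stated objective: simpler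
-- what changed: A's two sequential scans (one for the first 'human' message, one for the first 'gpt' message) are replaced by one loop that maintains both accumulators and exits early once both are found.
import Mathlib
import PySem

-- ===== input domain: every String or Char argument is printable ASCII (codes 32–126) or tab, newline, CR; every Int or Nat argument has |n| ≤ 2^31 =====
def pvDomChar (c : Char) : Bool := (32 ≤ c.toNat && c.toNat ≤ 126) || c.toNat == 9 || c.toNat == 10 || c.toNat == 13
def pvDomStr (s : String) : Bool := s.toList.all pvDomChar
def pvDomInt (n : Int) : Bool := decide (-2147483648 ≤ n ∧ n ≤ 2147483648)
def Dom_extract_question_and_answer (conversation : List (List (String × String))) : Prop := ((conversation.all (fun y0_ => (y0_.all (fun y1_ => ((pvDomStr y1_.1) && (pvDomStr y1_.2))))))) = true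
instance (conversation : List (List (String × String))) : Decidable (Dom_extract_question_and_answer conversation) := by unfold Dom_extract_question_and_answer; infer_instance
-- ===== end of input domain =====

-- B replaces A's two sequential scans by a single loop with two accumulators and an early exit (objective: simpler).

-- ===== PORT A =====
-- A's two loops are identical up to the target role; each is this scan: first msg whose
-- "from" equals the target yields its "value" lookup (none where Python raises KeyError on a
-- missing "value"; a missing "from" is none ≠ some t and Python's raise there is excluded by Pre_).
def pvFindFirst (t : String) : List (List (String × String)) → Option String
  | [] => none
  | m :: rest =>
      if List.lookup "from" m = some t then List.lookup "value" m
      else pvFindFirst t rest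

def extract_question_and_answer (conversation : List (List (String × String))) : Option String × Option String :=
  (pvFindFirst "human" conversation, pvFindFirst "gpt" conversation)

-- ===== PORT B =====
-- single pass carrying both accumulators, early return once both are set
def pvScanBoth : List (List (String × String)) → Option String → Option String → Option String × Option String
  | [], h, g => (h, g)
  | m :: rest, h, g =>
      let role := List.lookup "from" m
      let h' := if h = none ∧ role = some "human" then List.lookup "value" m else h
      let g' := if g = none ∧ role = some "gpt" then List.lookup "value" m else g
      if h' ≠ none ∧ g' ≠ none then (h', g') else pvScanBoth rest h' g'

def extract_question_and_answer_alt (conversation : List (List (String × String))) : Option String × Option String :=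
  pvScanBoth conversation none none

-- ===== PRECONDITION & SPEC =====
-- Pre_ excludes exactly the inputs on which the Python A raises KeyError: every message the
-- scan for role t inspects (the prefix up to and including the first msg with "from" = t, or
-- all of them if none matches) must have a "from" key, and the first msg with "from" = t, if
-- any, must have a "value" key; required for t = "human" and t = "gpt".
def pvOkScan (t : String) (conversation : List (List (String × String))) : Prop :=
  (∀ m ∈ conversation.takeWhile (fun m => !(List.lookup "from" m == some t)),
      (List.lookup "from" m).isSome = true) ∧
  (∀ m ∈ (conversation.dropWhile (fun m => !(List.lookup "from" m == some t))).take 1,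
      (List.lookup "value" m).isSome = true)

def Pre_extract_question_and_answer (conversation : List (List (String × String))) : Prop :=
  pvOkScan "human" conversation ∧ pvOkScan "gpt" conversation

instance (conversation : List (List (String × String))) : Decidable (Pre_extract_question_and_answer conversation) := by
  unfold Pre_extract_question_and_answer pvOkScan; infer_instance

def pvWitness_extract_question_and_answer : (List (List (String × String))) :=
  [[("from", "human"), ("value", "hi")], [("from", "gpt"), ("value", "yo")]]

def Spec_extract_question_and_answer (conversation : List (List (String × String))) (out : Option String × Option String) : Prop := out = extract_question_and_answer_alt conversation
instance (conversation : List (List (String × String))) (out : Option String × Option String) : Decidable (Spec_extract_question_and_answer conversation out) := by unfold Spec_extract_question_and_answer; infer_instance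

-- ===== CLAIM (what is proved, stated in full; the proofs are below) =====
def Claim_equal_extract_question_and_answer : Prop := ∀ (conversation : List (List (String × String))), Dom_extract_question_and_answer conversation → Pre_extract_question_and_answer conversation → Spec_extract_question_and_answer conversation (extract_question_and_answer conversation)

-- ===== LEMMAS AND PROOFS =====

-- once one accumulator is set, B scans only for the other role; with pvOkScan for that role
-- the first hit's value is some, so the early exit fires exactly at the first hit.
theorem pvScanBoth_human_set (x : String) :
    ∀ (conv : List (List (String × String))), pvOkScan "gpt" conv →
      pvScanBoth conv (some x) none = (some x, pvFindFirst "gpt" conv) := by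
  intro conv
  induction conv with
  | nil => intro _; rfl
  | cons m rest ih =>
    intro hok
    obtain ⟨h1, h2⟩ := hok
    by_cases hm : List.lookup "from" m = some "gpt"
    · have hv : (List.lookup "value" m).isSome = true := by
        apply h2; simp [hm]
      obtain ⟨v, hv⟩ := Option.isSome_iff_exists.mp hv
      simp [pvScanBoth, pvFindFirst, hm, hv]
    · have hrest : pvOkScan "gpt" rest := by
        constructor
        · intro m' hm'; apply h1; simp [hm, hm']
        · intro m' hm'; apply h2; simpa [List.dropWhile_cons, hm] using hm'
      simp [pvScanBoth, pvFindFirst, hm, ih hrest]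

theorem pvScanBoth_gpt_set (x : String) :
    ∀ (conv : List (List (String × String))), pvOkScan "human" conv →
      pvScanBoth conv none (some x) = (pvFindFirst "human" conv, some x) := by
  intro conv
  induction conv with
  | nil => intro _; rfl
  | cons m rest ih =>
    intro hok
    obtain ⟨h1, h2⟩ := hok
    by_cases hm : List.lookup "from" m = some "human"
    · have hv : (List.lookup "value" m).isSome = true := by
        apply h2; simp [hm]
      obtain ⟨v, hv⟩ := Option.isSome_iff_exists.mp hv
      simp [pvScanBoth, pvFindFirst, hm, hv]
    · have hrest : pvOkScan "human" rest := by
        constructor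
        · intro m' hm'; apply h1; simp [hm, hm']
        · intro m' hm'; apply h2; simpa [List.dropWhile_cons, hm] using hm'
      simp [pvScanBoth, pvFindFirst, hm, ih hrest]

theorem pvScanBoth_eq :
    ∀ (conv : List (List (String × String))),
      pvOkScan "human" conv → pvOkScan "gpt" conv →
      pvScanBoth conv none none = (pvFindFirst "human" conv, pvFindFirst "gpt" conv) := by
  intro conv
  induction conv with
  | nil => intro _ _; rfl
  | cons m rest ih =>
    intro hh hg
    obtain ⟨hh1, hh2⟩ := hh
    obtain ⟨hg1, hg2⟩ := hg
    by_cases hmh : List.lookup "from" m = some "human"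
    · have hv : (List.lookup "value" m).isSome = true := by
        apply hh2; simp [hmh]
      obtain ⟨v, hv⟩ := Option.isSome_iff_exists.mp hv
      have hmg : ¬ List.lookup "from" m = some "gpt" := by
        rw [hmh]; simp
      have hgrest : pvOkScan "gpt" rest := by
        constructor
        · intro m' hm'; apply hg1; simp [hmg, hm']
        · intro m' hm'; apply hg2; simpa [List.dropWhile_cons, hmg] using hm'
      simp [pvScanBoth, pvFindFirst, hmh, hv, pvScanBoth_human_set v rest hgrest]
    · by_cases hmg : List.lookup "from" m = some "gpt"
      · have hv : (List.lookup "value" m).isSome = true := by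
          apply hg2; simp [hmg]
        obtain ⟨v, hv⟩ := Option.isSome_iff_exists.mp hv
        have hhrest : pvOkScan "human" rest := by
          constructor
          · intro m' hm'; apply hh1; simp [hmh, hm']
          · intro m' hm'; apply hh2; simpa [List.dropWhile_cons, hmh] using hm'
        simp [pvScanBoth, pvFindFirst, hmg, hv, pvScanBoth_gpt_set v rest hhrest]
      · have hhrest : pvOkScan "human" rest := by
          constructor
          · intro m' hm'; apply hh1; simp [hmh, hm']
          · intro m' hm'; apply hh2; simpa [List.dropWhile_cons, hmh] using hm'
        have hgrest : pvOkScan "gpt" rest := by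
          constructor
          · intro m' hm'; apply hg1; simp [hmg, hm']
          · intro m' hm'; apply hg2; simpa [List.dropWhile_cons, hmg] using hm'
        simp [pvScanBoth, pvFindFirst, hmh, hmg, ih hhrest hgrest]

-- ===== VERDICT (by name: the statement is the Claim_ definition above) =====
theorem extract_question_and_answer_spec : Claim_equal_extract_question_and_answer := by
  intro conv _ hpre
  obtain ⟨hh, hg⟩ := hpre
  unfold Spec_extract_question_and_answer extract_question_and_answer extract_question_and_answer_alt
  exact (pvScanBoth_eq conv hh hg).symm
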